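-- pv_equiv track=rewrite | github.com/twoladel/py110 | small_problems/lsbot_practice_problems/practice_problems.py | segment_rotate
-- ===== SOURCE A (Python) =====
-- def rotate_sublist(sublist):
--     return sublist[1:] + sublist[0:1]
--
-- def segment_rotate(numbers, segment_size):
--     length = len(numbers)
--     rotated_list = []
--
--     if length % segment_size == 0:
--         for start in range(0, len(numbers), segment_size):
--             sublist = rotate_sublist(numbers[start:start + segment_size])
--             rotated_list.extend(sublist)
--         return rotated_list
--     else:
--         segment_count = length // segment_size
--         left_side_segment_size = length % segment_size
--         left_sublist = numbers[:left_side_segment_size]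
--         rotated_list.extend(rotate_sublist(left_sublist))
--
--         if segment_count > 1:
--             for start in range(left_side_segment_size, len(numbers), segment_size):
--                 sublist = rotate_sublist(numbers[start:start+segment_size])
--                 rotated_list.extend(sublist)
--         else:
--             right_sublist = numbers[left_side_segment_size:]
--             rotated_list.extend(rotate_sublist(right_sublist))
--
--         return rotated_list
-- ===== SOURCE B (Python) =====
-- def segment_rotate(numbers, segment_size):
--     r = len(numbers) % segment_size
--
--     def source_index(i):
--         if 0 < r and i < r:
--             start, seg_len = 0, r
--         else:
--             start = r + ((i - r) // segment_size) * segment_size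
--             seg_len = segment_size
--         return start + (i - start + 1) % seg_len
--
--     return [numbers[source_index(i)] for i in range(len(numbers))]
-- ===== Notes on version B (the rewrite author's own statement) =====
-- stated objective: alternative
-- what changed: B replaces A's slice-rotate-extend chunking (three separate branches over segment layouts) with a single comprehension over output indices that computes each element's source position by modular index arithmetic, building no intermediate sublists.
-- outside the precondition, e.g. on segment_rotate([1, 2, 3], -2): A returns [2, 1, 3], B raises IndexError
import Mathlib
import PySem

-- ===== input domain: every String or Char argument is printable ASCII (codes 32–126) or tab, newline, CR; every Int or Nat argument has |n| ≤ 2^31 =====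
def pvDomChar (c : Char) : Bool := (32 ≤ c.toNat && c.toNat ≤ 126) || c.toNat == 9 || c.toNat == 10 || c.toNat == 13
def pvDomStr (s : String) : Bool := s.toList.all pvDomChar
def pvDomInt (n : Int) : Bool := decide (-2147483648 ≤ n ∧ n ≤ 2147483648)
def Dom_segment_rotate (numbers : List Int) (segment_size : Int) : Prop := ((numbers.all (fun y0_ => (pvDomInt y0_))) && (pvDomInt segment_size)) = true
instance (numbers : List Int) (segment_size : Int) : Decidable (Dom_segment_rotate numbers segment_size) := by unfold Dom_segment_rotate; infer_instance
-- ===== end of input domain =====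

-- B replaces A's per-segment slice-rotate-extend chunking with one comprehension over output
-- indices computing each source position by modular arithmetic (alternative decomposition, same cost).

-- ===== PORT A =====
def rotate_sublist (sublist : List Int) : List Int :=
  PySem.List.slice sublist (some 1) none ++ PySem.List.slice sublist (some 0) (some 1)

def segment_rotate (numbers : List Int) (segment_size : Int) : List Int :=
  let length : Int := numbers.length
  if PySem.Int.mod length segment_size = 0 then
    (PySem.List.pyRange 0 numbers.length segment_size).foldl
      (fun rotated_list start =>
        rotated_list ++ rotate_sublist (PySem.List.slice numbers (some start) (some (start + segment_size)))) []
  else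
    let segment_count := PySem.Int.floordiv length segment_size
    let left_side_segment_size := PySem.Int.mod length segment_size
    let rotated_list := ([] : List Int) ++ rotate_sublist (PySem.List.slice numbers none (some left_side_segment_size))
    if 1 < segment_count then
      (PySem.List.pyRange left_side_segment_size numbers.length segment_size).foldl
        (fun acc start =>
          acc ++ rotate_sublist (PySem.List.slice numbers (some start) (some (start + segment_size)))) rotated_list
    else
      rotated_list ++ rotate_sublist (PySem.List.slice numbers (some left_side_segment_size) none)

-- ===== PORT B =====
-- Source B's helper source_index(i); closes over r and segment_size
def source_index (r segment_size i : Int) : Int :=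
  let (start, seg_len) :=
    if 0 < r ∧ i < r then ((0 : Int), r)
    else (r + PySem.Int.floordiv (i - r) segment_size * segment_size, segment_size)
  start + PySem.Int.mod (i - start + 1) seg_len

def segment_rotate_alt (numbers : List Int) (segment_size : Int) : List Int :=
  let r := PySem.Int.mod (numbers.length : Int) segment_size
  -- numbers[source_index(i)]: the index is always in range under Pre_, pyGetD's default is never used
  (PySem.List.pyRange 0 numbers.length 1).map
    (fun i => PySem.List.pyGetD numbers (source_index r segment_size i) 0)

-- ===== PRECONDITION & SPEC =====
-- Pre_ excludes segment_size ≤ 0: segment_size == 0 makes A raise ZeroDivisionError, and a negative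
-- segment_size is outside the task's natural domain (A's values there are accidents of Python's
-- floor-mod and empty ranges; B raises IndexError there).
def Pre_segment_rotate (numbers : List Int) (segment_size : Int) : Prop := 1 ≤ segment_size
instance (numbers : List Int) (segment_size : Int) : Decidable (Pre_segment_rotate numbers segment_size) := by
  unfold Pre_segment_rotate; infer_instance

def pvWitness_segment_rotate : List Int × Int := ([1, 2, 3, 4, 5], 2)

def Spec_segment_rotate (numbers : List Int) (segment_size : Int) (out : List Int) : Prop :=
  out = segment_rotate_alt numbers segment_size
instance (numbers : List Int) (segment_size : Int) (out : List Int) : Decidable (Spec_segment_rotate numbers segment_size out) := by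
  unfold Spec_segment_rotate; infer_instance

-- ===== CLAIM (what is proved, stated in full; the proofs are below) =====
def Claim_equal_segment_rotate : Prop := ∀ (numbers : List Int) (segment_size : Int), Dom_segment_rotate numbers segment_size → Pre_segment_rotate numbers segment_size → Spec_segment_rotate numbers segment_size (segment_rotate numbers segment_size)

-- ===== LEMMAS AND PROOFS =====

-- range(a, b, s) with positive step s peels its first element
lemma pyRange_pos_cons {a b s : Int} (hs : 0 < s) (hab : a < b) :
    PySem.List.pyRange a b s = a :: PySem.List.pyRange (a + s) b s := by
  rw [PySem.List.pyRange_of_pos _ _ hs, PySem.List.pyRange_of_pos _ _ hs]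
  rw [if_pos hab]
  have h1 : (b - a + s - 1) / s = (b - a - 1) / s + 1 := by
    rw [show b - a + s - 1 = b - a - 1 + 1 * s by ring, Int.add_mul_ediv_right _ _ (by omega)]
  by_cases h2 : a + s < b
  · rw [if_pos h2]
    have hq : 0 ≤ (b - a - 1) / s := Int.ediv_nonneg (by omega) (by omega)
    have h2' : (b - (a + s) + s - 1) / s = (b - a - 1) / s := by congr 1; ring
    rw [h1, h2', show ((b - a - 1) / s + 1).toNat = ((b - a - 1) / s).toNat + 1 by omega]
    rw [List.range_succ_eq_map]
    simp only [List.map_cons, List.map_map, Nat.cast_zero, mul_zero, add_zero, List.cons.injEq,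
      true_and]
    exact List.map_congr_left fun k _ => by simp [Function.comp, Nat.succ_eq_add_one]; ring
  · rw [if_neg h2]
    have hz : (b - a - 1) / s = 0 := by
      apply Int.ediv_eq_zero_of_lt (by omega) (by omega)
    rw [h1, hz]
    norm_num

-- rotating the segment numbers[s : s+L] is reading indices s + (k+1) % L for k = 0 .. L-1
lemma rot_chunk (numbers : List Int) (L : Int) (s : Nat) (hL : 1 ≤ L)
    (hend : s + L.toNat ≤ numbers.length) :
    rotate_sublist (PySem.List.slice numbers (some (s : Int)) (some ((s : Int) + L))) =
      (List.range L.toNat).map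
        (fun k : Nat => PySem.List.pyGetD numbers ((s : Int) + PySem.Int.mod ((k : Int) + 1) L) 0) := by
  set m := L.toNat with hm
  have hLpos : (0:Int) < L := by omega
  have hsl : PySem.List.slice numbers (some (s : Int)) (some ((s : Int) + L)) =
      (numbers.drop s).take m := by
    rw [PySem.List.slice_toNat numbers (by positivity) (by omega)]
    congr 1
    omega
  set chunk := (numbers.drop s).take m with hchunk
  have hlen : chunk.length = m := by
    simp [hchunk]
    omega
  have hget : ∀ j (hj : j < m), chunk[j]'(by omega) = numbers[s + j]'(by omega) := by
    intro j hj
    simp [hchunk, List.getElem_take, List.getElem_drop]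
  have hrot : rotate_sublist chunk = chunk.tail ++ chunk.take 1 := by
    rw [rotate_sublist, PySem.List.slice_from_one, PySem.List.slice_zero_start,
      PySem.List.slice_to chunk (by omega)]
    norm_num
  rw [hsl, hrot]
  have hmod : ∀ k : Nat, k < m → PySem.Int.mod ((k : Int) + 1) L = (((k+1) % m : Nat) : Int) := by
    intro k hk
    rw [PySem.Int.mod_eq_emod_of_pos hLpos]
    rcases Nat.lt_or_ge (k+1) m with h | h
    · rw [Int.emod_eq_of_lt (by omega) (by omega), Nat.mod_eq_of_lt h]
      push_cast; ring
    · have hk1 : ((k : Int) + 1) = L := by omega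
      rw [hk1, Int.emod_self, show k+1 = m by omega, Nat.mod_self]
      simp
  apply List.ext_getElem
  · simp [hlen]
    omega
  · intro j h1 h2
    have hjm : j < m := by simpa [hlen] using h2
    rw [List.getElem_map, List.getElem_range, hmod j hjm,
      PySem.List.pyGetD_eq_getElem numbers 0 (by positivity) (by have hlt : (j+1) % m < m := Nat.mod_lt _ (by omega); omega)]
    rw [List.getElem_append]
    simp only [List.length_tail, hlen]
    split
    · next hj' =>
      rw [List.getElem_tail, hget (j+1) (by omega)]
      congr 1
      have : (j+1) % m = j + 1 := Nat.mod_eq_of_lt (by omega)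
      omega
    · next hj' =>
      rw [List.getElem_take]
      have hj0 : j - (m - 1) = 0 := by omega
      simp only [hj0]
      rw [hget 0 (by omega)]
      congr 1
      have : (j+1) % m = 0 := by rw [show j+1 = m by omega, Nat.mod_self]
      omega

-- source_index inside the leading short segment [0, r)
lemma src_head (r seg : Int) (k : Nat) (hr : 0 < r) (hk : (k : Int) < r) :
    source_index r seg (k : Int) = PySem.Int.mod ((k : Int) + 1) r := by
  rw [source_index, if_pos ⟨hr, hk⟩]
  norm_num

-- source_index inside a full segment [s, s+seg) with r ≤ s and seg ∣ s - r
lemma src_tail (r seg s : Int) (k : Nat) (hseg : 1 ≤ seg) (_h0r : 0 ≤ r) (hrs : r ≤ s)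
    (hdvd : seg ∣ (s - r)) (hk : (k : Int) < seg) :
    source_index r seg (s + (k : Int)) = s + PySem.Int.mod ((k : Int) + 1) seg := by
  obtain ⟨q, hq⟩ := hdvd
  rw [mul_comm] at hq
  rw [source_index, if_neg (by rintro ⟨-, h⟩; omega)]
  have hdiv : PySem.Int.floordiv (s + (k : Int) - r) seg = q := by
    rw [PySem.Int.floordiv_eq_ediv_of_pos (by omega),
      show s + (k : Int) - r = (k : Int) + q * seg by omega,
      Int.add_mul_ediv_right _ _ (show seg ≠ 0 by omega),
      Int.ediv_eq_zero_of_lt (by positivity) hk, zero_add]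
  simp only [hdiv]
  have hst : r + q * seg = s := by omega
  rw [hst]
  congr 2
  ring

-- B's map over one segment of indices equals A's rotated slice of that segment
lemma map_block (numbers : List Int) (seg r s L : Int) (hL : 1 ≤ L) (h0s : 0 ≤ s)
    (hsn : s + L ≤ (numbers.length : Int))
    (hsrc : ∀ k : Nat, (k : Int) < L →
      source_index r seg (s + (k : Int)) = s + PySem.Int.mod ((k : Int) + 1) L) :
    (PySem.List.pyRange s (s + L) 1).map
        (fun i => PySem.List.pyGetD numbers (source_index r seg i) 0) =
      rotate_sublist (PySem.List.slice numbers (some s) (some (s + L))) := by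
  obtain ⟨t, rfl⟩ : ∃ t : Nat, (t : Int) = s := ⟨s.toNat, by omega⟩
  rw [PySem.List.pyRange_one, show ((t : Int) + L - t).toNat = L.toNat by omega, List.map_map,
    rot_chunk numbers L t hL (by omega)]
  apply List.map_congr_left
  intro k hk
  have hk' : (k : Int) < L := by
    have := List.mem_range.mp hk
    omega
  simp only [Function.comp_apply]
  rw [hsrc k hk']

-- A's chunking loop from s to the end equals B's index map over [s, n)
lemma fold_chunks (numbers : List Int) (seg r : Int) (hseg : 1 ≤ seg) (h0r : 0 ≤ r)
    (s : Int) (hrs : r ≤ s) (hdvd : seg ∣ (s - r)) (hsn : s ≤ (numbers.length : Int))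
    (hdvd2 : seg ∣ ((numbers.length : Int) - s)) (acc : List Int) :
    (PySem.List.pyRange s numbers.length seg).foldl
        (fun acc start =>
          acc ++ rotate_sublist (PySem.List.slice numbers (some start) (some (start + seg)))) acc =
      acc ++ (PySem.List.pyRange s numbers.length 1).map
          (fun i => PySem.List.pyGetD numbers (source_index r seg i) 0) := by
  suffices H : ∀ (d : Nat) (s : Int) (acc : List Int), r ≤ s → seg ∣ (s - r) →
      s ≤ (numbers.length : Int) → seg ∣ ((numbers.length : Int) - s) →
      (((numbers.length : Int) - s)).toNat ≤ d →
      (PySem.List.pyRange s numbers.length seg).foldl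
          (fun acc start =>
            acc ++ rotate_sublist (PySem.List.slice numbers (some start) (some (start + seg)))) acc =
        acc ++ (PySem.List.pyRange s numbers.length 1).map
            (fun i => PySem.List.pyGetD numbers (source_index r seg i) 0) by
    exact H _ s acc hrs hdvd hsn hdvd2 le_rfl
  intro d
  induction d with
  | zero =>
    intro s acc hrs hdvd hsn hdvd2 hd
    have hs : s = (numbers.length : Int) := by omega
    subst hs
    rw [PySem.List.pyRange_of_pos _ _ (show (0:Int) < seg by omega), if_neg (by omega),
      PySem.List.pyRange_one_eq_nil le_rfl]
    simp
  | succ d ih =>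
    intro s acc hrs hdvd hsn hdvd2 hd
    by_cases hlt : s < (numbers.length : Int)
    · obtain ⟨q, hq⟩ := hdvd2
      have hq0 : 0 < seg * q := by omega
      have hqpos : 0 < q := by nlinarith
      have hsegq : seg ≤ seg * q := by nlinarith
      have hstep : s + seg ≤ (numbers.length : Int) := by omega
      rw [pyRange_pos_cons (by omega) hlt, List.foldl_cons,
        PySem.List.pyRange_one_append s (s + seg) numbers.length (by omega) hstep,
        List.map_append]
      rw [ih (s + seg) (acc ++ rotate_sublist (PySem.List.slice numbers (some s) (some (s + seg))))
        (by omega)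
        (by obtain ⟨p, hp⟩ := hdvd
            exact ⟨p + 1, by rw [mul_add, mul_one, ← hp]; ring⟩)
        hstep ⟨q - 1, by rw [mul_sub, mul_one, ← hq]; ring⟩ (by omega)]
      rw [map_block numbers seg r s seg hseg (by omega) hstep
        (fun k hk => src_tail r seg s k hseg h0r hrs hdvd hk)]
      rw [List.append_assoc]
    · have hs : s = (numbers.length : Int) := by omega
      subst hs
      rw [PySem.List.pyRange_of_pos _ _ (show (0:Int) < seg by omega), if_neg (by omega),
        PySem.List.pyRange_one_eq_nil le_rfl]
      simp

-- ===== VERDICT (by name: the statement is the Claim_ definition above) =====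
lemma head_block (numbers : List Int) (seg r : Int) (_hseg : 1 ≤ seg)
    (hr : 0 < r) (hrn : r ≤ (numbers.length : Int)) :
    (PySem.List.pyRange 0 r 1).map
        (fun i => PySem.List.pyGetD numbers (source_index r seg i) 0) =
      rotate_sublist (PySem.List.slice numbers none (some r)) := by
  have h := map_block numbers seg r 0 r (by omega) le_rfl (by omega)
    (fun k hk => by rw [zero_add, src_head r seg k hr hk, zero_add])
  rw [zero_add] at h
  rw [h, PySem.List.slice_zero_start]

theorem segment_rotate_spec : Claim_equal_segment_rotate := by
  intro numbers seg _hDom hPre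
  have hseg : (1:Int) ≤ seg := hPre
  unfold Spec_segment_rotate segment_rotate segment_rotate_alt
  set n : Int := (numbers.length : Int) with hn
  set r : Int := PySem.Int.mod n seg with hrdef
  have hrem : r = n % seg := by rw [hrdef, PySem.Int.mod_eq_emod_of_pos (by omega)]
  have h0n : (0:Int) ≤ n := by rw [hn]; positivity
  have h0r : (0:Int) ≤ r := by rw [hrem]; exact Int.emod_nonneg n (by omega)
  have hrseg : r < seg := by rw [hrem]; exact Int.emod_lt_of_pos n (by omega)
  have hdecomp : seg * (n / seg) + r = n := by rw [hrem]; exact Int.mul_ediv_add_emod n seg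
  have hqnn : (0:Int) ≤ n / seg := Int.ediv_nonneg h0n (by omega)
  have hsq : (0:Int) ≤ seg * (n / seg) := mul_nonneg (by omega) hqnn
  have hrn : r ≤ n := by omega
  have hsplit : PySem.List.pyRange 0 n 1 = PySem.List.pyRange 0 r 1 ++ PySem.List.pyRange r n 1 :=
    PySem.List.pyRange_one_append 0 r n h0r hrn
  have hdvd2 : seg ∣ n - r := ⟨n / seg, by omega⟩
  by_cases hz : r = 0
  · rw [if_pos hz]
    rw [fold_chunks numbers seg r hseg h0r 0 (by omega) ⟨0, by omega⟩ h0n ⟨n / seg, by omega⟩,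
      List.nil_append]
  · rw [if_neg hz]
    have hfd : PySem.Int.floordiv n seg = n / seg := PySem.Int.floordiv_eq_ediv_of_pos (by omega)
    rw [hsplit, List.map_append, head_block numbers seg r hseg (by omega) hrn]
    by_cases hc : 1 < PySem.Int.floordiv n seg
    · rw [if_pos hc]
      rw [fold_chunks numbers seg r hseg h0r r le_rfl ⟨0, by omega⟩ hrn hdvd2]
      simp only [← hrdef, ← hn]
      simp
    · rw [if_neg hc]
      rw [hfd] at hc
      have hq01 : n / seg = 0 ∨ n / seg = 1 := by omega
      rcases hq01 with hq | hq
      · have hnr : n = r := by rw [hq] at hdecomp; omega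
        have htail : PySem.List.pyRange r n 1 = [] := by
          rw [hnr]; exact PySem.List.pyRange_one_eq_nil le_rfl
        have hslice : PySem.List.slice numbers (some r) none = [] := by
          rw [PySem.List.slice_from numbers h0r]
          apply List.drop_eq_nil_of_le
          omega
        simp only [← hrdef]
        rw [htail, hslice]
        simp [rotate_sublist, PySem.List.slice]
      · have hnr : r + seg = n := by rw [hq] at hdecomp; omega
        have hslice : PySem.List.slice numbers (some r) none =
            PySem.List.slice numbers (some r) (some (r + seg)) := by
          rw [PySem.List.slice_from numbers h0r, PySem.List.slice_toNat numbers h0r (by omega)]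
          rw [List.take_of_length_le (by simp; omega)]
        have htail : (PySem.List.pyRange r n 1).map
            (fun i => PySem.List.pyGetD numbers (source_index r seg i) 0) =
            rotate_sublist (PySem.List.slice numbers (some r) (some (r + seg))) := by
          rw [← hnr]
          exact map_block numbers seg r r seg hseg h0r (by omega)
            (fun k hk => src_tail r seg r k hseg h0r le_rfl ⟨0, by omega⟩ hk)
        simp only [← hrdef]
        rw [htail, hslice]
        simp
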